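-- pv_equiv track=rewrite | github.com/ben-hawks/wa-hls4ml-search | hls4ml_rf_finder.py | get_valid_reuse_factors
-- ===== SOURCE A (Python) =====
-- import math
--
-- def get_valid_reuse_factors(n_in, n_out):
--     max_rf = n_in * n_out
--     valid_reuse_factors = []
--     for rf in range(1, max_rf + 1):
--         _assert = _validate_reuse_factor(n_in, n_out, rf)
--         if _assert:
--             valid_reuse_factors.append(rf)
--     return valid_reuse_factors
--
-- def _validate_reuse_factor(n_in, n_out, rf):
--     multfactor = min(n_in, rf)
--     multiplier_limit = int(math.ceil((n_in * n_out) / float(multfactor)))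
--     #
--     # THIS ASSERTION IS FOR THE FUNCTIONAL CORRECTNESS OF THE DENSE LAYER
--     #
--     _assert = ((multiplier_limit % n_out) == 0) or (rf >= n_in)
--     _assert = _assert and (((rf % n_in) == 0) or (rf < n_in))
--     #
--     # THIS ASSERTION IS FOR QoR AND EXECUTION TIME
--     #
--     _assert = _assert and (((n_in * n_out) % rf) == 0)
--
--     return _assert
-- ===== SOURCE B (Python) =====
-- import math
--
-- def get_valid_reuse_factors(n_in, n_out):
--     # Enumerate divisor pairs (d, p//d) of p = n_in*n_out up to sqrt(p), testing each
--     # candidate with an early-exit validity check; small divisors are collected in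
--     # ascending order, their cofactors in descending order, so one reverse + concat
--     # yields the ascending result without sorting or scanning the whole range 1..p.
--     p = n_in * n_out
--     small = []
--     large = []
--     d = 1
--     while d * d <= p:
--         if p % d == 0:
--             if _ok(n_in, n_out, d):
--                 small.append(d)
--             q = p // d
--             if q != d and _ok(n_in, n_out, q):
--                 large.append(q)
--         d += 1
--     large.reverse()
--     return small + large
--
-- def _ok(n_in, n_out, rf):
--     # Same three conditions as the original validator, with early exits; the float
--     # ceiling only matters on the branch rf < n_in (there multfactor == rf).
--     if (n_in * n_out) % rf != 0:
--         return False
--     if rf >= n_in: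
--         return rf % n_in == 0
--     return int(math.ceil((n_in * n_out) / float(rf))) % n_out == 0
-- ===== Notes on version B (the rewrite author's own statement) =====
-- stated objective: faster
-- what changed: B enumerates only the divisor pairs (d, p//d) of p = n_in*n_out up to sqrt(p) with an early-exit validity test (small divisors collected ascending, cofactors descending, one reverse + concat instead of a sort), rather than scanning and testing every rf in 1..p.
import Mathlib
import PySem

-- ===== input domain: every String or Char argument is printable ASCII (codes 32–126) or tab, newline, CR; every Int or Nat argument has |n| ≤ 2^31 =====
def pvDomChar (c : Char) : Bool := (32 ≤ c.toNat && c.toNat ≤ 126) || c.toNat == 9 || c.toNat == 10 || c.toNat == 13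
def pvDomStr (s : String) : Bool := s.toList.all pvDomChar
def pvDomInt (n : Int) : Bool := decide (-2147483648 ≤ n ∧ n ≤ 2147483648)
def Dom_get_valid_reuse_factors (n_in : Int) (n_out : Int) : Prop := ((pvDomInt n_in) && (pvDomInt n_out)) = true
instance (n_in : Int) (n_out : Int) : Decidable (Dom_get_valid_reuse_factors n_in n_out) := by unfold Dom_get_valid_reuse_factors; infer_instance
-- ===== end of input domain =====

-- B enumerates divisor pairs of n_in*n_out up to sqrt instead of scanning 1..n_in*n_out (faster on the
-- timing inputs as measured); both ports model Python's float division/ceil exactly, each with its own code.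

-- ===== PORT A =====
-- A-side helpers: exact model of `int(math.ceil((n_in*n_out) / float(mf)))` (IEEE-754 double semantics
-- ported by hand — PySem has no float primitives; exact for the magnitudes reachable here: |P| ≤ 2^62,
-- 0 < |mf| ≤ 2^31, normal doubles, no overflow/underflow).
-- pvFindK p q fuel k: smallest k' ≥ k with q ≤ p * 2^k' (fuel bounds the search; 200 » the ≤ 84 bits needed here)
def pvFindK (p q : Int) : Nat → Nat → Nat
  | 0, k => k
  | fuel + 1, k => if q ≤ p * 2 ^ k then k else pvFindK p q fuel (k + 1)

-- round-to-nearest-even of the positive rational p/q to 53 significant bits; returns (m, e) with value m*2^e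
def pvFlround (p q : Int) : Int × Int :=
  let t : Int := if q ≤ p then (PySem.Int.bitLength (p / q) : Int) - 1 else -(pvFindK p q 200 1 : Int)
  let e : Int := t - 52
  let nd : Int × Int := if 0 ≤ e then (p, q * 2 ^ e.toNat) else (p * 2 ^ (-e).toNat, q)
  let m := nd.1 / nd.2
  let r := nd.1 % nd.2
  if 2 * r > nd.2 ∨ (2 * r = nd.2 ∧ m % 2 = 1) then (m + 1, e) else (m, e)

def pvCeilME (m e : Int) : Int := if 0 ≤ e then m * 2 ^ e.toNat else -((-m) / 2 ^ (-e).toNat)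
def pvFloorME (m e : Int) : Int := if 0 ≤ e then m * 2 ^ e.toNat else m / 2 ^ (-e).toNat

-- int(math.ceil(P / float(mf))) = ceil(fl(fl(P) / mf)); sign handled as magnitude + sign (P > 0, mf ≠ 0 whenever reached)
def pvCeilFloatDiv (P mf : Int) : Int :=
  let f1 := pvFlround P 1
  if 0 < mf then
    let f2 := if 0 ≤ f1.2 then pvFlround (f1.1 * 2 ^ f1.2.toNat) mf else pvFlround f1.1 (mf * 2 ^ (-f1.2).toNat)
    pvCeilME f2.1 f2.2
  else
    let f2 := if 0 ≤ f1.2 then pvFlround (f1.1 * 2 ^ f1.2.toNat) (-mf) else pvFlround f1.1 ((-mf) * 2 ^ (-f1.2).toNat)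
    Neg.neg (pvFloorME f2.1 f2.2)

-- _validate_reuse_factor, transliterated
def pvValidateRF (n_in : Int) (n_out : Int) (rf : Int) : Bool :=
  let multfactor := min n_in rf
  let multiplier_limit := pvCeilFloatDiv (n_in * n_out) multfactor
  let a1 := (PySem.Int.mod multiplier_limit n_out == 0) || decide (n_in ≤ rf)
  let a2 := a1 && ((PySem.Int.mod rf n_in == 0) || decide (rf < n_in))
  a2 && (PySem.Int.mod (n_in * n_out) rf == 0)

def get_valid_reuse_factors (n_in : Int) (n_out : Int) : List Int :=
  let max_rf := n_in * n_out
  (PySem.List.pyRange 1 (max_rf + 1) 1).foldl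
    (fun acc rf => if pvValidateRF n_in n_out rf then acc ++ [rf] else acc) []

-- ===== PORT B =====
-- B-side float model (same IEEE-754 double semantics, modelled by different means: mantissa/denominator
-- normalisation by a doubling loop instead of bit-length arithmetic; exact on the positive inputs B reaches).
-- bNorm fuel a b e: double a (resp. b) until b*2^52 ≤ a < b*2^53, tracking the exponent e of a/b
def bNorm : Nat → Int → Int → Int → Int × Int × Int
  | 0, a, b, e => (a, b, e)
  | fuel + 1, a, b, e =>
    if a < b * 2 ^ 52 then bNorm fuel (2 * a) b (e - 1)
    else if b * 2 ^ 53 ≤ a then bNorm fuel a (2 * b) (e + 1)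
    else (a, b, e)

-- nearest double (round-half-even, 53 bits) to p/q for 0 < q ≤ p, as (mantissa, exponent)
def bRound (p q : Int) : Int × Int :=
  let n := bNorm 300 p q 0
  let m := n.1 / n.2.1
  let r := n.1 % n.2.1
  if n.2.1 < 2 * r then (m + 1, n.2.2)
  else if 2 * r == n.2.1 && m % 2 == 1 then (m + 1, n.2.2)
  else (m, n.2.2)

-- int(math.ceil(P / float(rf))) for 0 < rf ≤ P (the only case B's branch reaches)
def bCeil (P rf : Int) : Int :=
  let f1 := bRound P 1
  let f2 := if 0 ≤ f1.2 then bRound (f1.1 * 2 ^ f1.2.toNat) rf else bRound f1.1 (rf * 2 ^ (-f1.2).toNat)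
  if 0 ≤ f2.2 then f2.1 * 2 ^ f2.2.toNat else (f2.1 + 2 ^ (-f2.2).toNat - 1) / 2 ^ (-f2.2).toNat

-- _ok: the validator with early exits (float ceiling only on the branch rf < n_in)
def bOk (n_in : Int) (n_out : Int) (rf : Int) : Bool :=
  if ¬ (PySem.Int.mod (n_in * n_out) rf = 0) then false
  else if n_in ≤ rf then PySem.Int.mod rf n_in == 0
  else PySem.Int.mod (bCeil (n_in * n_out) rf) n_out == 0

-- while d*d <= p: collect valid small divisors (ascending) and valid cofactors (descending)
def bLoop (n_in n_out p : Int) (d : Int) (small large : List Int) : List Int × List Int :=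
  if hlt : d * d ≤ p then
    if PySem.Int.mod p d == 0 then
      bLoop n_in n_out p (d + 1)
        (if bOk n_in n_out d then small ++ [d] else small)
        (if PySem.Int.floordiv p d ≠ d ∧ bOk n_in n_out (PySem.Int.floordiv p d) = true then
          large ++ [PySem.Int.floordiv p d]
         else large)
    else bLoop n_in n_out p (d + 1) small large
  else (small, large)
termination_by (p + 1 - d).toNat
decreasing_by
  all_goals
    have hd : d ≤ p := by
      by_cases h0 : d ≤ 0
      · nlinarith [mul_self_nonneg d]
      · nlinarith [hlt]
    omega

def get_valid_reuse_factors_alt (n_in : Int) (n_out : Int) : List Int :=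
  let p := n_in * n_out
  let r := bLoop n_in n_out p 1 [] []
  r.1 ++ r.2.reverse

-- ===== PRECONDITION & SPEC =====
def Spec_get_valid_reuse_factors (n_in : Int) (n_out : Int) (out : List Int) : Prop := out = get_valid_reuse_factors_alt n_in n_out
instance (n_in : Int) (n_out : Int) (out : List Int) : Decidable (Spec_get_valid_reuse_factors n_in n_out out) := by unfold Spec_get_valid_reuse_factors; infer_instance

-- ===== CLAIM (what is proved, stated in full; the proofs are below) =====
def Claim_equal_get_valid_reuse_factors : Prop := ∀ (n_in : Int) (n_out : Int), Dom_get_valid_reuse_factors n_in n_out → Spec_get_valid_reuse_factors n_in n_out (get_valid_reuse_factors n_in n_out)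


-- ===== LEMMAS AND PROOFS =====

theorem bNorm_fix (f : Nat) (a b e : Int) (h1 : b * 2 ^ 52 ≤ a) (h2 : a < b * 2 ^ 53) :
    bNorm f a b e = (a, b, e) := by
  cases f with
  | zero => rfl
  | succ f => rw [bNorm, if_neg (not_lt.mpr h1), if_neg (not_le.mpr h2)]




theorem bNorm_phase1 : ∀ (f : Nat) (a b e : Int), 0 < b → 0 < a → a < b * 2 ^ 52 → b * 2 ^ 52 ≤ a * 2 ^ f →
    ∃ i : Nat, bNorm f a b e = (a * 2 ^ i, b, e - i) ∧ b * 2 ^ 52 ≤ a * 2 ^ i ∧ a * 2 ^ i < b * 2 ^ 53 := by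
  intro f
  induction f with
  | zero =>
    intro a b e hb ha h1 h2
    simp only [pow_zero, mul_one] at h2
    exact absurd h1 (not_lt.mpr h2)
  | succ f ih =>
    intro a b e hb ha h1 h2
    rw [bNorm, if_pos h1]
    by_cases h3 : 2 * a < b * 2 ^ 52
    · obtain ⟨i, hEq, hlo, hhi⟩ := ih (2 * a) b (e - 1) hb (by omega) h3 (by nlinarith [pow_succ (2:Int) f])
      refine ⟨i + 1, ?_, by nlinarith [pow_succ (2:Int) i], by nlinarith [pow_succ (2:Int) i]⟩
      rw [hEq]
      simp only [Prod.mk.injEq]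
      exact ⟨by ring, trivial, by push_cast; ring⟩
    · rw [bNorm_fix f (2 * a) b (e - 1) (by omega) (by nlinarith [pow_succ (2:Int) 52])]
      refine ⟨1, ?_, by omega, by nlinarith [pow_succ (2:Int) 52]⟩
      simp only [Prod.mk.injEq]
      exact ⟨by ring, trivial, by push_cast; ring⟩

theorem bNorm_phase2 : ∀ (f : Nat) (a b e : Int), 0 < b → b * 2 ^ 53 ≤ a → a < b * 2 ^ (53 + f) →
    ∃ j : Nat, bNorm f a b e = (a, b * 2 ^ j, e + j) ∧ b * 2 ^ j * 2 ^ 52 ≤ a ∧ a < b * 2 ^ j * 2 ^ 53 := by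
  intro f
  induction f with
  | zero =>
    intro a b e hb h1 h2
    simp only [Nat.add_zero] at h2
    exact absurd h1 (not_le.mpr h2)
  | succ f ih =>
    intro a b e hb h1 h2
    have hnl : ¬ a < b * 2 ^ 52 := by nlinarith [pow_succ (2:Int) 52]
    rw [bNorm, if_neg hnl, if_pos h1]
    by_cases h3 : (2 * b) * 2 ^ 53 ≤ a
    · obtain ⟨j, hEq, hlo, hhi⟩ := ih a (2 * b) (e + 1) (by omega) h3
        (by rw [show 53 + (f + 1) = (53 + f) + 1 by ring] at h2; nlinarith [pow_succ (2:Int) (53 + f)])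
      refine ⟨j + 1, ?_, by nlinarith [pow_succ (2:Int) j], by nlinarith [pow_succ (2:Int) j]⟩
      rw [hEq]
      simp only [Prod.mk.injEq]
      exact ⟨trivial, by ring, by push_cast; ring⟩
    · rw [bNorm_fix f a (2 * b) (e + 1) (by nlinarith [pow_succ (2:Int) 52]) (by omega)]
      refine ⟨1, ?_, by nlinarith [pow_succ (2:Int) 52], by omega⟩
      simp only [Prod.mk.injEq]
      exact ⟨trivial, by ring, by push_cast; ring⟩

theorem bNorm_char (a b : Int) (hb : 0 < b) (hba : b ≤ a) (ha : a < 2 ^ 250) :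
    ∃ i j : Nat, bNorm 300 a b 0 = (a * 2 ^ i, b * 2 ^ j, (j : Int) - (i : Int)) ∧
      b * 2 ^ j * 2 ^ 52 ≤ a * 2 ^ i ∧ a * 2 ^ i < b * 2 ^ j * 2 ^ 53 := by
  by_cases h1 : a < b * 2 ^ 52
  · obtain ⟨i, hEq, hlo, hhi⟩ := bNorm_phase1 300 a b 0 hb (by omega) h1
      (by
        have hA : b * 2 ^ 52 ≤ a * 2 ^ 52 := mul_le_mul_of_nonneg_right hba (by positivity)
        have hB : a * 2 ^ 52 ≤ a * 2 ^ 300 := mul_le_mul_of_nonneg_left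
          (pow_le_pow_right₀ (by norm_num) (by norm_num)) (by omega)
        exact le_trans hA hB)
    exact ⟨i, 0, by rw [hEq]; norm_num, by simpa using hlo, by simpa using hhi⟩
  · by_cases h2 : b * 2 ^ 53 ≤ a
    · obtain ⟨j, hEq, hlo, hhi⟩ := bNorm_phase2 300 a b 0 hb h2
        (by
        have hA : (2:Int) ^ 250 ≤ 2 ^ (53 + 300) := pow_le_pow_right₀ (by norm_num) (by norm_num)
        have hB : (1:Int) * 2 ^ (53 + 300) ≤ b * 2 ^ (53 + 300) :=
          mul_le_mul_of_nonneg_right (by omega) (by positivity)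
        rw [one_mul] at hB
        exact lt_of_lt_of_le ha (le_trans hA hB))
      exact ⟨0, j, by rw [hEq]; norm_num, by simpa using hlo, by simpa using hhi⟩
    · rw [bNorm_fix 300 a b 0 (by omega) (by omega)]
      exact ⟨0, 0, by norm_num, by simpa using not_lt.mp h1, by simpa using not_le.mp h2⟩


theorem bitLength_brackets (p q : Int) (hq : 0 < q) (hpq : q ≤ p) :
    1 ≤ PySem.Int.bitLength (p / q) ∧
    q * 2 ^ (PySem.Int.bitLength (p / q) - 1) ≤ p ∧ p < q * 2 ^ (PySem.Int.bitLength (p / q)) := by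
  set m := p / q with hm
  have hm1 : 1 ≤ m := by
    rw [hm, Int.le_ediv_iff_mul_le hq, one_mul]; exact hpq
  have hdm := Int.ediv_add_emod p q
  have hr0 := Int.emod_nonneg p (by omega : q ≠ 0)
  have hrq := Int.emod_lt_of_pos p hq
  have habs : ((m.natAbs : Int)) = m := Int.natAbs_of_nonneg (by omega)
  have hL1 : 1 ≤ PySem.Int.bitLength m := by
    by_contra h
    have h0 : PySem.Int.bitLength m = 0 := by omega
    have := PySem.Int.lt_two_pow_bitLength m
    rw [h0] at this
    simp at this
    omega
  refine ⟨hL1, ?_, ?_⟩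
  · have hlow := PySem.Int.two_pow_bitLength_le m (by omega)
    have hlow' : (2:Int) ^ (PySem.Int.bitLength m - 1) ≤ m := by
      calc (2:Int) ^ (PySem.Int.bitLength m - 1) = ((2 ^ (PySem.Int.bitLength m - 1) : Nat) : Int) := by push_cast; ring
        _ ≤ (m.natAbs : Int) := by exact_mod_cast hlow
        _ = m := habs
    nlinarith [mul_le_mul_of_nonneg_left hlow' (by omega : (0:Int) ≤ q)]
  · have hhigh := PySem.Int.lt_two_pow_bitLength m
    have hhigh' : m < (2:Int) ^ (PySem.Int.bitLength m) := by
      calc m = (m.natAbs : Int) := habs.symm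
        _ < ((2 ^ (PySem.Int.bitLength m) : Nat) : Int) := by exact_mod_cast hhigh
        _ = (2:Int) ^ (PySem.Int.bitLength m) := by push_cast; ring
    nlinarith [mul_le_mul_of_nonneg_left (by omega : m + 1 ≤ (2:Int) ^ (PySem.Int.bitLength m)) (by omega : (0:Int) ≤ q)]


theorem roundStep_scale (x y : Int) (hy : 0 < y) (s : Nat) (E : Int) :
    (if y * 2 ^ s < 2 * ((x * 2 ^ s) % (y * 2 ^ s)) then ((x * 2 ^ s) / (y * 2 ^ s) + 1, E)
     else if 2 * ((x * 2 ^ s) % (y * 2 ^ s)) == y * 2 ^ s && ((x * 2 ^ s) / (y * 2 ^ s)) % 2 == 1 then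
       ((x * 2 ^ s) / (y * 2 ^ s) + 1, E)
     else ((x * 2 ^ s) / (y * 2 ^ s), E))
    = (if 2 * (x % y) > y ∨ (2 * (x % y) = y ∧ (x / y) % 2 = 1) then (x / y + 1, E) else (x / y, E)) := by
  have hs : (0:Int) < 2 ^ s := by positivity
  have hdiv : (x * 2 ^ s) / (y * 2 ^ s) = x / y := by
    rw [mul_comm x _, mul_comm y _]; exact Int.mul_ediv_mul_of_pos x y hs
  have hmod : (x * 2 ^ s) % (y * 2 ^ s) = 2 ^ s * (x % y) := by
    rw [mul_comm x _, mul_comm y _]; exact Int.mul_emod_mul_of_pos x y hs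
  rw [hdiv, hmod]
  have hc1 : (y * 2 ^ s < 2 * (2 ^ s * (x % y))) ↔ y < 2 * (x % y) := by
    constructor <;> intro h <;> nlinarith
  have hc2 : (2 * (2 ^ s * (x % y)) = y * 2 ^ s) ↔ 2 * (x % y) = y := by
    constructor <;> intro h <;> nlinarith
  by_cases h1 : y < 2 * (x % y)
  · rw [if_pos (hc1.mpr h1), if_pos (Or.inl h1)]
  · rw [if_neg (fun h => h1 (hc1.mp h))]
    by_cases h2 : 2 * (x % y) = y
    · by_cases h3 : (x / y) % 2 = 1
      · rw [if_pos (by simp [hc2.mpr h2, h3]), if_pos (Or.inr ⟨h2, h3⟩)]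
      · rw [if_neg (by simp [h3]), if_neg (by rintro (h | ⟨_, h⟩); exact h1 h; exact h3 h)]
    · rw [if_neg (by simp only [Bool.and_eq_true, beq_iff_eq]; rintro ⟨h, _⟩; exact h2 (hc2.mp h)),
        if_neg (by rintro (h | ⟨h, _⟩); exact h1 h; exact h2 h)]

theorem round_agree (p q : Int) (hq : 0 < q) (hpq : q ≤ p) (hp : p < 2 ^ 250) :
    bRound p q = pvFlround p q := by
  obtain ⟨i, j, hEq, hlo, hhi⟩ := bNorm_char p q hq hpq hp
  obtain ⟨hL1, hlow, hhigh⟩ := bitLength_brackets p q hq hpq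
  set L := PySem.Int.bitLength (p / q) with hLdef
  have hexp : L - 1 + i = j + 52 := by
    have h1 : (2:Int) ^ (L - 1 + i) < 2 ^ (j + 53) := by
      have hA : q * 2 ^ (L - 1) * 2 ^ i ≤ p * 2 ^ i := mul_le_mul_of_nonneg_right hlow (by positivity)
      have hcmp : q * 2 ^ (L - 1 + i) < q * 2 ^ (j + 53) := by
        rw [pow_add, pow_add]
        calc q * (2 ^ (L - 1) * 2 ^ i) = q * 2 ^ (L - 1) * 2 ^ i := by ring
          _ ≤ p * 2 ^ i := hA
          _ < q * 2 ^ j * 2 ^ 53 := hhi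
          _ = q * (2 ^ j * 2 ^ 53) := by ring
      exact lt_of_mul_lt_mul_left hcmp (by omega)
    have h2 : (2:Int) ^ (j + 52) < 2 ^ (L + i) := by
      have hB : p * 2 ^ i < q * 2 ^ L * 2 ^ i := mul_lt_mul_of_pos_right hhigh (by positivity)
      have hcmp : q * 2 ^ (j + 52) < q * 2 ^ (L + i) := by
        rw [pow_add, pow_add]
        calc q * (2 ^ j * 2 ^ 52) = q * 2 ^ j * 2 ^ 52 := by ring
          _ ≤ p * 2 ^ i := hlo
          _ < q * 2 ^ L * 2 ^ i := hB
          _ = q * (2 ^ L * 2 ^ i) := by ring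
      exact lt_of_mul_lt_mul_left hcmp (by omega)
    have e1 : L - 1 + i < j + 53 := by
      by_contra hcon
      exact absurd h1 (not_lt.mpr (pow_le_pow_right₀ (by norm_num) (by omega)))
    have e2 : j + 52 < L + i := by
      by_contra hcon
      exact absurd h2 (not_lt.mpr (pow_le_pow_right₀ (by norm_num) (by omega)))
    omega
  simp only [bRound, pvFlround, if_pos hpq]
  rw [hEq]
  by_cases hc : 53 ≤ L
  · have he : (0:Int) ≤ (L : Int) - 1 - 52 := by
      have : (53:Int) ≤ (L : Int) := by exact_mod_cast hc
      omega
    rw [if_pos he]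
    have htn : ((L : Int) - 1 - 52).toNat = L - 53 := by omega
    rw [htn]
    have hj : q * 2 ^ j = (q * 2 ^ (L - 53)) * 2 ^ i := by
      rw [mul_assoc, ← pow_add]
      congr 2
      omega
    have hE : ((j : Int) - (i : Int)) = (L : Int) - 1 - 52 := by omega
    dsimp only
    rw [hj, hE]
    exact roundStep_scale p (q * 2 ^ (L - 53)) (by positivity) i ((L : Int) - 1 - 52)
  · have he : ¬ (0:Int) ≤ (L : Int) - 1 - 52 := by omega
    rw [if_neg he]
    have htn : (-((L : Int) - 1 - 52)).toNat = 53 - L := by omega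
    rw [htn]
    have hi : p * 2 ^ i = (p * 2 ^ (53 - L)) * 2 ^ j := by
      rw [mul_assoc, ← pow_add]
      congr 2
      omega
    have hE : ((j : Int) - (i : Int)) = (L : Int) - 1 - 52 := by omega
    dsimp only
    rw [hi, hE]
    exact roundStep_scale (p * 2 ^ (53 - L)) q hq j ((L : Int) - 1 - 52)

theorem ceil_pos_eq (m : Int) (k : Nat) :
    (m + 2 ^ k - 1) / 2 ^ k = -((-m) / 2 ^ k) := by
  have hn : (0:Int) < 2 ^ k := by positivity
  have h1 := Int.ediv_add_emod (-m) (2 ^ k)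
  have h2 := Int.ediv_add_emod (m + 2 ^ k - 1) (2 ^ k)
  have r1a := Int.emod_nonneg (-m) (ne_of_gt hn)
  have r1b := Int.emod_lt_of_pos (-m) hn
  have r2a := Int.emod_nonneg (m + 2 ^ k - 1) (ne_of_gt hn)
  have r2b := Int.emod_lt_of_pos (m + 2 ^ k - 1) hn
  set d1 := (-m) / 2 ^ k with hd1
  set d2 := (m + 2 ^ k - 1) / 2 ^ k with hd2
  have key : (2 ^ k) * (d2 + d1) = 2 ^ k - 1 - ((-m) % 2 ^ k) - ((m + 2 ^ k - 1) % 2 ^ k) := by linarith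
  have hz : d2 + d1 = 0 := by
    rcases lt_trichotomy (d2 + d1) 0 with h | h | h
    · have hmul : (2:Int) ^ k * (d2 + d1) ≤ 2 ^ k * (-1) := mul_le_mul_of_nonneg_left (by omega) (le_of_lt hn)
      linarith
    · exact h
    · have hmul : (2:Int) ^ k * 1 ≤ 2 ^ k * (d2 + d1) := mul_le_mul_of_nonneg_left (by omega) (le_of_lt hn)
      linarith
  omega

theorem ceil_tail (p2 q2 : Int) (hq2 : 0 < q2) (hle : q2 ≤ p2) (hp2 : p2 < 2 ^ 250) :
    (if 0 ≤ (bRound p2 q2).2 then (bRound p2 q2).1 * 2 ^ (bRound p2 q2).2.toNat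
     else ((bRound p2 q2).1 + 2 ^ (-(bRound p2 q2).2).toNat - 1) / 2 ^ (-(bRound p2 q2).2).toNat)
    = pvCeilME (pvFlround p2 q2).1 (pvFlround p2 q2).2 := by
  have hag := round_agree p2 q2 hq2 hle hp2
  rw [← hag]
  simp only [pvCeilME]
  by_cases h : 0 ≤ (bRound p2 q2).2
  · rw [if_pos h, if_pos h]
  · rw [if_neg h, if_neg h]
    exact ceil_pos_eq (bRound p2 q2).1 (-(bRound p2 q2).2).toNat

theorem ceilDiv_agree (P mf : Int) (hmf : 1 ≤ mf) (hP : mf ≤ P) (hP2 : P ≤ 2 ^ 63) (hmf2 : mf ≤ 2 ^ 52) :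
    bCeil P mf = pvCeilFloatDiv P mf := by
  have h1P : (1:Int) ≤ P := le_trans hmf hP
  have h63 : (2:Int) ^ 63 < 2 ^ 250 := pow_lt_pow_right₀ (by norm_num) (by norm_num)
  have hP250 : P < 2 ^ 250 := by linarith
  have hr1 : bRound P 1 = pvFlround P 1 := round_agree P 1 one_pos h1P hP250
  obtain ⟨i, j, hEq, hlo, hhi⟩ := bNorm_char P 1 one_pos h1P hP250
  by_cases hije : i ≤ j
  · have hb : (0:Int) < 1 * 2 ^ j := by positivity
    have hm0lo : (2:Int) ^ 52 ≤ (P * 2 ^ i) / (1 * 2 ^ j) := by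
      rw [Int.le_ediv_iff_mul_le hb]
      nlinarith
    have hm0hi : (P * 2 ^ i) / (1 * 2 ^ j) < 2 ^ 53 := by
      rw [Int.ediv_lt_iff_lt_mul hb]
      nlinarith
    have hji : j ≤ i + 11 := by
      have hA : (2:Int) ^ (j + 52) ≤ 2 ^ (i + 63) := by
        rw [pow_add, pow_add]
        calc (2:Int) ^ j * 2 ^ 52 = 1 * 2 ^ j * 2 ^ 52 := by ring
          _ ≤ P * 2 ^ i := hlo
          _ ≤ 2 ^ 63 * 2 ^ i := by nlinarith [pow_pos (by norm_num : (0:Int) < 2) i]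
          _ = 2 ^ i * 2 ^ 63 := by ring
      by_contra hcon
      exact absurd hA (not_le.mpr (pow_lt_pow_right₀ (by norm_num) (by omega)))
    have hf1 : ∃ M : Int, bRound P 1 = (M, (j:Int) - i) ∧ 2 ^ 52 ≤ M ∧ M ≤ 2 ^ 53 := by
      simp only [bRound]
      rw [hEq]
      dsimp only
      split_ifs <;> exact ⟨_, rfl, by omega, by omega⟩
    obtain ⟨M, hf1, hMlo, hMhi⟩ := hf1
    have hE : (0:Int) ≤ (j:Int) - i := by omega
    have hEt : ((j:Int) - (i:Int)).toNat = j - i := by omega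
    have h1t : (1:Int) ≤ 2 ^ (j - i) := one_le_pow₀ (by norm_num)
    have hq2 : mf ≤ M * 2 ^ (j - i) := by nlinarith
    have hp2bound : M * 2 ^ (j - i) < 2 ^ 250 := by
      have h2 : (2:Int) ^ (j - i) ≤ 2 ^ 11 := pow_le_pow_right₀ (by norm_num) (by omega)
      nlinarith [(by norm_num : (2:Int) ^ 53 * 2 ^ 11 < 2 ^ 250)]
    simp only [bCeil, pvCeilFloatDiv]
    rw [if_pos (show (0:Int) < mf by omega), ← hr1, hf1]
    dsimp only
    rw [if_pos hE, if_pos hE, hEt]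
    exact ceil_tail (M * 2 ^ (j - i)) mf (by omega) hq2 hp2bound
  · have hij : j < i := by omega
    have hf1 : bRound P 1 = (P * 2 ^ (i - j), (j:Int) - i) := by
      simp only [bRound]
      rw [hEq]
      dsimp only
      have hsplit : P * 2 ^ i = (P * 2 ^ (i - j)) * (1 * 2 ^ j) := by
        rw [one_mul, mul_assoc, ← pow_add]
        congr 2
        omega
      have hdvd : (P * 2 ^ i) / (1 * 2 ^ j) = P * 2 ^ (i - j) := by
        rw [hsplit]
        exact Int.mul_ediv_cancel _ (by positivity)
      have hr : (P * 2 ^ i) % (1 * 2 ^ j) = 0 := by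
        rw [hsplit]
        exact Int.mul_emod_left _ _
      rw [hdvd, hr]
      have hposj : ¬ (1 * (2:Int) ^ j < 2 * 0) := by
        simp only [mul_zero, one_mul, not_lt]
        positivity
      rw [if_neg hposj, if_neg (by
        simp only [mul_zero, Bool.and_eq_true, beq_iff_eq, one_mul]
        rintro ⟨h0, -⟩
        exact absurd h0.symm (ne_of_gt (by positivity)))]
    have hEneg : ¬ (0:Int) ≤ (j:Int) - i := by omega
    have hEt : (-((j:Int) - (i:Int))).toNat = i - j := by omega
    have hii : i ≤ j + 52 := by
      have hA : (2:Int) ^ i < 2 ^ (j + 53) := by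
        calc (2:Int) ^ i ≤ P * 2 ^ i := by nlinarith [pow_pos (by norm_num : (0:Int) < 2) i]
          _ < 1 * 2 ^ j * 2 ^ 53 := hhi
          _ = 2 ^ (j + 53) := by rw [pow_add]; ring
      by_contra hcon
      exact absurd hA (not_lt.mpr (pow_le_pow_right₀ (by norm_num) (by omega)))
    have hq2le : mf * 2 ^ (i - j) ≤ P * 2 ^ (i - j) := mul_le_mul_of_nonneg_right hP (by positivity)
    have hp2bound : P * 2 ^ (i - j) < 2 ^ 250 := by
      have h2 : (2:Int) ^ (i - j) ≤ 2 ^ 52 := pow_le_pow_right₀ (by norm_num) (by omega)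
      nlinarith [(by norm_num : (2:Int) ^ 63 * 2 ^ 52 < 2 ^ 250), pow_pos (by norm_num : (0:Int) < 2) (i - j)]
    simp only [bCeil, pvCeilFloatDiv]
    rw [if_pos (show (0:Int) < mf by omega), ← hr1, hf1]
    dsimp only
    rw [if_neg hEneg, if_neg hEneg, hEt]
    exact ceil_tail (P * 2 ^ (i - j)) (mf * 2 ^ (i - j)) (mul_pos (by omega) (by positivity)) hq2le hp2bound

theorem ok_eq_validate (n_in n_out rf : Int) (h1 : 1 ≤ rf) (h2 : rf ≤ n_in * n_out)
    (h3 : n_in * n_out ≤ 2 ^ 63) (h4 : n_in ≤ 2 ^ 52) :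
    bOk n_in n_out rf = pvValidateRF n_in n_out rf := by
  simp only [bOk, pvValidateRF]
  by_cases h0 : PySem.Int.mod (n_in * n_out) rf = 0
  · rw [if_neg (not_not.mpr h0)]
    by_cases hge : n_in ≤ rf
    · rw [if_pos hge]
      simp [hge, not_lt.mpr hge, h0]
    · rw [if_neg hge]
      have hlt : rf < n_in := not_le.mp hge
      rw [min_eq_right (le_of_lt hlt)]
      rw [← ceilDiv_agree (n_in * n_out) rf h1 h2 h3 (le_trans (le_of_lt hlt) h4)]
      simp [hge, hlt, h0]
  · rw [if_pos h0]
    simp [h0]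


theorem bOk_dvd {n_in n_out rf : Int} (h : bOk n_in n_out rf = true) :
    PySem.Int.mod (n_in * n_out) rf = 0 := by
  unfold bOk at h
  by_cases h0 : PySem.Int.mod (n_in * n_out) rf = 0
  · exact h0
  · simp [h0] at h

theorem bLoop_mem (n_in n_out p : Int) : ∀ (d : Int) (small large : List Int), 1 ≤ d → ∀ x,
    (x ∈ (bLoop n_in n_out p d small large).1 ↔
      x ∈ small ∨ ∃ c, d ≤ c ∧ c * c ≤ p ∧ PySem.Int.mod p c = 0 ∧ bOk n_in n_out c = true ∧ x = c) ∧
    (x ∈ (bLoop n_in n_out p d small large).2 ↔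
      x ∈ large ∨ ∃ c, d ≤ c ∧ c * c ≤ p ∧ PySem.Int.mod p c = 0 ∧
        (PySem.Int.floordiv p c ≠ c ∧ bOk n_in n_out (PySem.Int.floordiv p c) = true) ∧
        x = PySem.Int.floordiv p c) := by
  intro d small large
  induction d, small, large using bLoop.induct n_in n_out p with
  | case1 d small large hlt hmod ih =>
    intro hd x
    have hmod' : PySem.Int.mod p d = 0 := by simpa using hmod
    rw [bLoop, dif_pos hlt, if_pos hmod]
    simp only [dite_eq_ite] at ih
    obtain ⟨ih1, ih2⟩ := ih (by omega) x
    constructor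
    · rw [ih1]
      constructor
      · rintro (hx | ⟨c, hc1, hc2, hc3, hc4, hc5⟩)
        · by_cases hok : bOk n_in n_out d = true
          · simp only [if_pos hok, List.mem_append, List.mem_singleton] at hx
            rcases hx with hx | hxd
            · exact Or.inl hx
            · exact Or.inr ⟨d, le_refl d, hlt, hmod', hok, hxd⟩
          · rw [if_neg hok] at hx
            exact Or.inl hx
        · exact Or.inr ⟨c, by omega, hc2, hc3, hc4, hc5⟩
      · rintro (hx | ⟨c, hc1, hc2, hc3, hc4, hc5⟩)
        · left
          by_cases hok : bOk n_in n_out d = true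
          · simp only [if_pos hok, List.mem_append, List.mem_singleton]
            exact Or.inl hx
          · rw [if_neg hok]
            exact hx
        · rcases eq_or_lt_of_le hc1 with rfl | hcd
          · left
            subst hc5
            simp only [if_pos hc4, List.mem_append, List.mem_singleton]
            exact Or.inr trivial
          · exact Or.inr ⟨c, by omega, hc2, hc3, hc4, hc5⟩
    · rw [ih2]
      constructor
      · rintro (hx | ⟨c, hc1, hc2, hc3, hc4, hc5⟩)
        · by_cases hok : PySem.Int.floordiv p d ≠ d ∧ bOk n_in n_out (PySem.Int.floordiv p d) = true
          · simp only [if_pos hok, List.mem_append, List.mem_singleton] at hx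
            rcases hx with hx | hxd
            · exact Or.inl hx
            · exact Or.inr ⟨d, le_refl d, hlt, hmod', hok, hxd⟩
          · rw [if_neg hok] at hx
            exact Or.inl hx
        · exact Or.inr ⟨c, by omega, hc2, hc3, hc4, hc5⟩
      · rintro (hx | ⟨c, hc1, hc2, hc3, hc4, hc5⟩)
        · left
          by_cases hok : PySem.Int.floordiv p d ≠ d ∧ bOk n_in n_out (PySem.Int.floordiv p d) = true
          · simp only [if_pos hok, List.mem_append, List.mem_singleton]
            exact Or.inl hx
          · rw [if_neg hok]
            exact hx
        · rcases eq_or_lt_of_le hc1 with rfl | hcd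
          · left
            subst hc5
            simp only [if_pos hc4, List.mem_append, List.mem_singleton]
            exact Or.inr trivial
          · exact Or.inr ⟨c, by omega, hc2, hc3, hc4, hc5⟩
  | case2 d small large hlt hmod ih =>
    intro hd x
    rw [bLoop, dif_pos hlt, if_neg hmod]
    obtain ⟨ih1, ih2⟩ := ih (by omega) x
    have hnod : ¬ PySem.Int.mod p d = 0 := by simpa using hmod
    constructor
    · rw [ih1]
      constructor
      · rintro (hx | ⟨c, hc1, hc2, hc3, hc4, hc5⟩)
        · exact Or.inl hx
        · exact Or.inr ⟨c, by omega, hc2, hc3, hc4, hc5⟩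
      · rintro (hx | ⟨c, hc1, hc2, hc3, hc4, hc5⟩)
        · exact Or.inl hx
        · rcases eq_or_lt_of_le hc1 with rfl | hcd
          · exact absurd hc3 hnod
          · exact Or.inr ⟨c, by omega, hc2, hc3, hc4, hc5⟩
    · rw [ih2]
      constructor
      · rintro (hx | ⟨c, hc1, hc2, hc3, hc4, hc5⟩)
        · exact Or.inl hx
        · exact Or.inr ⟨c, by omega, hc2, hc3, hc4, hc5⟩
      · rintro (hx | ⟨c, hc1, hc2, hc3, hc4, hc5⟩)
        · exact Or.inl hx
        · rcases eq_or_lt_of_le hc1 with rfl | hcd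
          · exact absurd hc3 hnod
          · exact Or.inr ⟨c, by omega, hc2, hc3, hc4, hc5⟩
  | case3 d small large hlt =>
    intro hd x
    rw [bLoop, dif_neg hlt]
    have hno : ∀ c : Int, d ≤ c → ¬ (c * c ≤ p) := by
      intro c hc
      nlinarith
    constructor
    · constructor
      · exact Or.inl
      · rintro (hx | ⟨c, hc1, hc2, _⟩)
        · exact hx
        · exact absurd hc2 (hno c hc1)
    · constructor
      · exact Or.inl
      · rintro (hx | ⟨c, hc1, hc2, _⟩)
        · exact hx
        · exact absurd hc2 (hno c hc1)

theorem bLoop_sorted (n_in n_out p : Int) : ∀ (d : Int) (small large : List Int), 1 ≤ d →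
    small.Pairwise (· < ·) → large.Pairwise (fun a b => b < a) →
    (∀ x ∈ small, x < d) → (∀ x ∈ large, 0 < x ∧ p < x * d) →
    (bLoop n_in n_out p d small large).1.Pairwise (· < ·) ∧
    (bLoop n_in n_out p d small large).2.Pairwise (fun a b => b < a) := by
  intro d small large
  induction d, small, large using bLoop.induct n_in n_out p with
  | case1 d small large hlt hmod ih =>
    intro hd hps hpl hbs hbl
    rw [bLoop, dif_pos hlt, if_pos hmod]
    simp only [dite_eq_ite] at ih
    have hmod' : PySem.Int.mod p d = 0 := by simpa using hmod
    have hq := PySem.Int.floordiv_mul_add_mod p d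
    rw [hmod'] at hq
    set q := PySem.Int.floordiv p d with hqdef
    have hpq : q * d = p := by omega
    have hq0 : 0 < q := by nlinarith
    apply ih (by omega)
    · by_cases hok : bOk n_in n_out d = true
      · rw [if_pos hok, List.pairwise_append]
        refine ⟨hps, by simp, ?_⟩
        intro a ha b hb
        simp only [List.mem_singleton] at hb
        subst hb
        exact hbs a ha
      · rw [if_neg hok]
        exact hps
    · by_cases hok : q ≠ d ∧ bOk n_in n_out q = true
      · rw [if_pos hok, List.pairwise_append]
        refine ⟨hpl, by simp, ?_⟩
        intro a ha b hb
        simp only [List.mem_singleton] at hb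
        subst hb
        obtain ⟨ha0, had⟩ := hbl a ha
        nlinarith
      · rw [if_neg hok]
        exact hpl
    · intro x hx
      by_cases hok : bOk n_in n_out d = true
      · rw [if_pos hok] at hx
        simp only [List.mem_append, List.mem_singleton] at hx
        rcases hx with hx | rfl
        · have := hbs x hx
          omega
        · omega
      · rw [if_neg hok] at hx
        have := hbs x hx
        omega
    · intro x hx
      by_cases hok : q ≠ d ∧ bOk n_in n_out q = true
      · rw [if_pos hok] at hx
        simp only [List.mem_append, List.mem_singleton] at hx
        rcases hx with hx | rfl
        · obtain ⟨h0, h1⟩ := hbl x hx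
          exact ⟨h0, by nlinarith⟩
        · exact ⟨hq0, by nlinarith⟩
      · rw [if_neg hok] at hx
        obtain ⟨h0, h1⟩ := hbl x hx
        exact ⟨h0, by nlinarith⟩
  | case2 d small large hlt hmod ih =>
    intro hd hps hpl hbs hbl
    rw [bLoop, dif_pos hlt, if_neg hmod]
    apply ih (by omega) hps hpl
    · intro x hx
      have := hbs x hx
      omega
    · intro x hx
      obtain ⟨h0, h1⟩ := hbl x hx
      exact ⟨h0, by nlinarith⟩
  | case3 d small large hlt =>
    intro hd hps hpl hbs hbl
    rw [bLoop, dif_neg hlt]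
    exact ⟨hps, hpl⟩

-- ===== VERDICT (by name: the statement is the Claim_ definition above) =====
theorem get_valid_reuse_factors_spec : Claim_equal_get_valid_reuse_factors := by
  intro n_in n_out hdom
  simp only [Dom_get_valid_reuse_factors, pvDomInt, Bool.and_eq_true, decide_eq_true_eq] at hdom
  obtain ⟨⟨hi1, hi2⟩, ho1, ho2⟩ := hdom
  unfold Spec_get_valid_reuse_factors get_valid_reuse_factors get_valid_reuse_factors_alt
  rw [PySem.List.foldl_append_if_eq_filter, List.nil_append]
  by_cases hp1 : 1 ≤ n_in * n_out
  · set p := n_in * n_out with hpdef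
    have hP63 : p ≤ 2 ^ 63 := by
      calc p ≤ |p| := le_abs_self p
        _ = |n_in| * |n_out| := abs_mul n_in n_out
        _ ≤ 2147483648 * 2147483648 := by
            apply mul_le_mul (abs_le.mpr ⟨hi1, hi2⟩) (abs_le.mpr ⟨ho1, ho2⟩) (abs_nonneg _) (by norm_num)
        _ ≤ 2 ^ 63 := by norm_num
    have hVB : ∀ x : Int, 1 ≤ x → x ≤ p → pvValidateRF n_in n_out x = bOk n_in n_out x := by
      intro x h1 h2
      exact (ok_eq_validate n_in n_out x h1 h2 hP63 (by norm_num at hi2 ⊢; omega)).symm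
    set S := (bLoop n_in n_out p 1 [] []).1 with hS
    set L := (bLoop n_in n_out p 1 [] []).2 with hL
    have hmem := bLoop_mem n_in n_out p 1 [] [] le_rfl
    have hsorted := bLoop_sorted n_in n_out p 1 [] [] le_rfl (by simp) (by simp) (by simp) (by simp)
    -- membership characterization of S and L
    have hSL : ∀ x : Int, (x ∈ S ∨ x ∈ L) ↔
        (1 ≤ x ∧ x ≤ p ∧ PySem.Int.mod p x = 0 ∧ bOk n_in n_out x = true) := by
      intro x
      obtain ⟨hm1, hm2⟩ := hmem x
      rw [← hS] at hm1; rw [← hL] at hm2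
      simp only [List.not_mem_nil, false_or] at hm1 hm2
      constructor
      · rintro (hx | hx)
        · obtain ⟨c, hc1, hc2, hc3, hc4, rfl⟩ := hm1.mp hx
          exact ⟨hc1, by nlinarith, hc3, hc4⟩
        · obtain ⟨c, hc1, hc2, hc3, ⟨hne, hok⟩, rfl⟩ := hm2.mp hx
          have hqc := PySem.Int.floordiv_mul_add_mod p c
          rw [hc3] at hqc
          set q := PySem.Int.floordiv p c with hqd
          have hq0 : 0 < q := by nlinarith
          refine ⟨by omega, by nlinarith, ?_, hok⟩
          rw [PySem.Int.mod_eq_zero_iff_dvd]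
          exact ⟨c, by linarith⟩
      · rintro ⟨h1, h2, h3, h4⟩
        have hqx := PySem.Int.floordiv_mul_add_mod p x
        rw [h3] at hqx
        set q := PySem.Int.floordiv p x with hqd
        have hq0 : 0 < q := by nlinarith
        by_cases hxx : x * x ≤ p
        · exact Or.inl (hm1.mpr ⟨x, h1, hxx, h3, h4, rfl⟩)
        · right
          apply hm2.mpr
          have hqlt : q < x := by nlinarith
          have hfq : PySem.Int.floordiv p q = x := by
            rw [PySem.Int.floordiv_eq_ediv_of_pos hq0, show p = x * q by linarith]
            exact Int.mul_ediv_cancel x (by omega)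
          refine ⟨q, hq0, by nlinarith, ?_, ⟨by omega, by rw [hfq]; exact h4⟩, hfq.symm⟩
          rw [PySem.Int.mod_eq_zero_iff_dvd]
          exact ⟨x, by linarith⟩
    -- both lists are strictly increasing
    have hpair1 : ((PySem.List.pyRange 1 (p + 1) 1).filter (pvValidateRF n_in n_out)).Pairwise (· < ·) :=
      List.Pairwise.sublist List.filter_sublist (PySem.List.pairwise_lt_pyRange_one _ _)
    have hpair2 : (S ++ L.reverse).Pairwise (· < ·) := by
      rw [List.pairwise_append]
      refine ⟨hsorted.1, List.pairwise_reverse.mpr hsorted.2, ?_⟩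
      intro a ha b hb
      rw [List.mem_reverse] at hb
      obtain ⟨hm1, _⟩ := hmem a
      obtain ⟨_, hm2⟩ := hmem b
      simp only [List.not_mem_nil, false_or] at hm1 hm2
      obtain ⟨c, hc1, hc2, hc3, hc4, rfl⟩ := hm1.mp ha
      obtain ⟨c', hc1', hc2', hc3', ⟨hne', hok'⟩, rfl⟩ := hm2.mp hb
      have hqc := PySem.Int.floordiv_mul_add_mod p c'
      rw [hc3'] at hqc
      set q' := PySem.Int.floordiv p c' with hqd'
      have hqc' : q' * c' = p := by linarith
      have hq0 : 0 < q' := by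
        by_cases hle : q' ≤ 0
        · exfalso
          nlinarith [mul_nonneg (by linarith : (0:Int) ≤ -q') (by linarith : (0:Int) ≤ c' - 1)]
        · linarith
      have hcq : c' < q' := by
        rcases lt_trichotomy c' q' with h | h | h
        · exact h
        · exact absurd h.symm hne'
        · exfalso
          nlinarith [mul_pos (by linarith : (0:Int) < c' - q') (by linarith : (0:Int) < c')]
      have hpb : p < q' * q' := by nlinarith
      nlinarith
    -- permutation
    have hperm : ((PySem.List.pyRange 1 (p + 1) 1).filter (pvValidateRF n_in n_out)).Perm (S ++ L.reverse) := by
      rw [List.perm_ext_iff_of_nodup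
        (List.Nodup.filter _ (PySem.List.nodup_pyRange_one _ _))
        (hpair2.imp ne_of_lt)]
      intro x
      rw [List.mem_filter, PySem.List.mem_pyRange_one, List.mem_append, List.mem_reverse, hSL x]
      constructor
      · rintro ⟨⟨h1, h2⟩, hv⟩
        rw [hVB x h1 (by omega)] at hv
        exact ⟨h1, by omega, bOk_dvd hv, hv⟩
      · rintro ⟨h1, h2, h3, h4⟩
        refine ⟨⟨h1, by omega⟩, ?_⟩
        rw [hVB x h1 h2]
        exact h4
    exact List.Perm.eq_of_pairwise (fun a b _ _ h1 h2 => le_antisymm h1 h2)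
      (hpair1.imp le_of_lt) (hpair2.imp le_of_lt) hperm
  · have h1 : PySem.List.pyRange 1 (n_in * n_out + 1) 1 = [] := PySem.List.pyRange_one_eq_nil (by omega)
    have h2 : bLoop n_in n_out (n_in * n_out) 1 [] [] = ([], []) := by
      rw [bLoop, dif_neg (by omega)]
    simp [h1, h2]
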